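-- pv_equiv track=rewrite | github.com/azr4e1/LeetCode | triangle.py | sumLines
-- ===== SOURCE A (Python) =====
-- def sumLines(line_prev, line_succ):
--     new_line = []
--     for i in range(len(line_prev)):
--         if i == 0:
--             new_line.append(line_prev[i] + line_succ[i])
--         else:
--             new_el = line_prev[i] + line_succ[i]
--             if new_el < new_line[i]:
--                 new_line[i] = new_el
--
--         new_line.append(line_prev[i] + line_succ[i+1])
--     return new_line
-- ===== SOURCE B (Python) =====
-- def sumLines(line_prev, line_succ):
--     if not line_prev:
--         return []
--     # stage 1: sandwich the pairwise-adjacent minima between the two edge cells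
--     mins = [line_prev[0]] + [min(a, b) for a, b in zip(line_prev, line_prev[1:])] + [line_prev[-1]]
--     # stage 2: add line_succ elementwise (zip truncates line_succ to len(mins))
--     return [s + m for s, m in zip(line_succ, mins)]
-- ===== Notes on version B (the rewrite author's own statement) =====
-- stated objective: alternative
-- what changed: B is built in two staged passes over whole lists with no index arithmetic: it first forms the minima row by zipping line_prev with its own tail and sandwiching the two edge elements, then zipWith-adds line_succ; A makes one indexed pass that appends two cells per step and conditionally overwrites the overlapping one.
-- outside the precondition, e.g. on sumLines([1, 2], [3]): A raises IndexError, B returns [4]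
import Mathlib
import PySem

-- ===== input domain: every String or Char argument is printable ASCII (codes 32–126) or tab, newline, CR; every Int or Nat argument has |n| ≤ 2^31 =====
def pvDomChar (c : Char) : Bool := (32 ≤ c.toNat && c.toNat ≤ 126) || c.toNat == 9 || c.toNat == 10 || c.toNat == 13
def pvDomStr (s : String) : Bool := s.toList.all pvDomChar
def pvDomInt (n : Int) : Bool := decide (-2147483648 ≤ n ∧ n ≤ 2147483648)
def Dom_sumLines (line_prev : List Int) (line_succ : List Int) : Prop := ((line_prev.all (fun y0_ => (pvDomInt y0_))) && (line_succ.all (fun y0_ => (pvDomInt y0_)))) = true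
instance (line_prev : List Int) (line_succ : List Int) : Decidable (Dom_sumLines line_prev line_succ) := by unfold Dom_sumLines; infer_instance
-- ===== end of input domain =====

-- B builds the result in staged whole-list passes (zip line_prev with its own tail for the minima row, then zipWith-add line_succ) instead of A's indexed append-then-overwrite pass; return-value equivalence on all inputs where A does not raise.


-- ===== PORT A =====
-- faithful port of A: for each input index i, append prev[i]+succ[i] (overwriting
-- cell i with the min when i>0), then append prev[i]+succ[i+1]
def sumLines (line_prev : List Int) (line_succ : List Int) : List Int :=
  (List.range line_prev.length).foldl
    (fun new_line i =>
      let s := line_prev.getD i 0 + line_succ.getD i 0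
      let new_line :=
        if i = 0 then new_line ++ [s]
        else if s < new_line.getD i 0 then new_line.set i s else new_line
      new_line ++ [line_prev.getD i 0 + line_succ.getD (i + 1) 0])
    []

-- ===== PORT B =====
-- faithful port of Source B: mins = [prev[0]] ++ pairwise minima (zip of prev with its own
-- tail) ++ [prev[-1]], then zipWith (+) line_succ mins (zipWith truncates like Python zip)
def sumLines_alt (line_prev : List Int) (line_succ : List Int) : List Int :=
  if line_prev.isEmpty then []
  else
    List.zipWith (· + ·) line_succ
      (line_prev.headD 0
        :: (line_prev.zip (line_prev.drop 1)).map (fun ab => min ab.1 ab.2)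
        ++ [line_prev.getLastD 0])

-- ===== PRECONDITION & SPEC =====
-- Pre_ excludes the inputs on which A raises IndexError: a nonempty line_prev with
-- line_succ shorter than len(line_prev)+1.
def Pre_sumLines (line_prev : List Int) (line_succ : List Int) : Prop :=
  line_prev = [] ∨ line_prev.length + 1 ≤ line_succ.length
instance (line_prev : List Int) (line_succ : List Int) : Decidable (Pre_sumLines line_prev line_succ) := by unfold Pre_sumLines; infer_instance
def pvWitness_sumLines : List Int × List Int := ([2, -3, 5], [1, 0, 4, 7])

def Spec_sumLines (line_prev : List Int) (line_succ : List Int) (out : List Int) : Prop := out = sumLines_alt line_prev line_succ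
instance (line_prev : List Int) (line_succ : List Int) (out : List Int) : Decidable (Spec_sumLines line_prev line_succ out) := by unfold Spec_sumLines; infer_instance

-- ===== CLAIM (what is proved, stated in full; the proofs are below) =====
def Claim_equal_sumLines : Prop := ∀ (line_prev : List Int) (line_succ : List Int), Dom_sumLines line_prev line_succ → Pre_sumLines line_prev line_succ → Spec_sumLines line_prev line_succ (sumLines line_prev line_succ)

-- ===== LEMMAS AND PROOFS =====

-- set/getD at the position just past a list of known length
theorem pv_getD_last (P : List Int) (last v : Int) : (P ++ [last]).getD P.length v = last := by
  induction P with
  | nil => rfl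
  | cons a t ih => simp

theorem pv_set_last (P : List Int) (last a : Int) : (P ++ [last]).set P.length a = P ++ [a] := by
  induction P with
  | nil => rfl
  | cons b t ih => simp

-- loop invariant for A: after processing indices 0..k-1 (k ≥ 1) A's accumulator is
-- exactly the head cell, the interior minima cells for 1..k-1, and the provisional
-- cell succ[k]+prev[k-1]
theorem pv_loopInv (p s : List Int) (k : Nat) (hk : 1 ≤ k) :
    (List.range k).foldl
      (fun new_line i =>
        (if i = 0 then new_line ++ [p.getD i 0 + s.getD i 0]
          else
            if p.getD i 0 + s.getD i 0 < new_line.getD i 0 then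
              new_line.set i (p.getD i 0 + s.getD i 0)
            else new_line) ++
          [p.getD i 0 + s.getD (i + 1) 0])
      [] =
    ((s.getD 0 0 + p.getD 0 0)
      :: (List.range' 1 (k - 1)).map
           (fun j => s.getD j 0 + min (p.getD (j - 1) 0) (p.getD j 0)))
      ++ [s.getD k 0 + p.getD (k - 1) 0] := by
  induction k with
  | zero => omega
  | succ k ih =>
    rcases Nat.eq_or_lt_of_le hk with h1 | h1
    · have : k = 0 := by omega
      subst this
      simp [List.range_succ]
      omega
    · have hk1 : 1 ≤ k := by omega
      rw [List.range_succ, List.foldl_append, ih hk1]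
      simp only [List.foldl_cons, List.foldl_nil]
      have hne : k ≠ 0 := by omega
      rw [if_neg hne]
      set P : List Int := (s.getD 0 0 + p.getD 0 0)
        :: (List.range' 1 (k - 1)).map
             (fun j => s.getD j 0 + min (p.getD (j - 1) 0) (p.getD j 0)) with hP
      have hPlen : P.length = k := by simp [hP]; omega
      have hget : (P ++ [s.getD k 0 + p.getD (k - 1) 0]).getD k 0
          = s.getD k 0 + p.getD (k - 1) 0 := by
        rw [← hPlen]; exact pv_getD_last _ _ _
      have hset : (P ++ [s.getD k 0 + p.getD (k - 1) 0]).set k (p.getD k 0 + s.getD k 0)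
          = P ++ [p.getD k 0 + s.getD k 0] := by
        rw [← hPlen]; exact pv_set_last _ _ _
      have hmin : (if p.getD k 0 + s.getD k 0 < s.getD k 0 + p.getD (k - 1) 0
            then P ++ [p.getD k 0 + s.getD k 0]
            else P ++ [s.getD k 0 + p.getD (k - 1) 0])
          = P ++ [s.getD k 0 + min (p.getD (k - 1) 0) (p.getD k 0)] := by
        rw [Int.min_def]; split_ifs with h h2 h2 <;> simp <;> omega
      rw [hget, hset, hmin]
      have hrange : List.range' 1 (k + 1 - 1) = List.range' 1 (k - 1) ++ [k] := by
        have : k + 1 - 1 = (k - 1) + 1 := by omega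
        rw [this, List.range'_concat]
        congr 2
        omega
      simp only [hrange, List.map_append, hP]
      simp
      omega

-- bridge: B's staged zip construction equals the same head/interior/last normal form,
-- given line_succ long enough
theorem pv_bridge (p s : List Int) (hne : p ≠ []) (hs : p.length + 1 ≤ s.length) :
    List.zipWith (· + ·) s
      (p.headD 0 :: (p.zip (p.drop 1)).map (fun ab => min ab.1 ab.2) ++ [p.getLastD 0]) =
    ((s.getD 0 0 + p.getD 0 0)
      :: (List.range' 1 (p.length - 1)).map
           (fun j => s.getD j 0 + min (p.getD (j - 1) 0) (p.getD j 0)))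
      ++ [s.getD p.length 0 + p.getD (p.length - 1) 0] := by
  have hn : 1 ≤ p.length := List.length_pos_of_ne_nil hne
  have hlastD : p.getLastD 0 = p[p.length - 1]'(by omega) := by
    rw [List.getLastD_eq_getLast?, List.getLast?_eq_getElem?]
    rw [List.getElem?_eq_getElem (by omega)]
    rfl
  apply List.ext_getElem
  · simp only [List.length_zipWith, List.length_cons, List.length_append, List.length_map,
      List.length_range', List.length_zip, List.length_drop, List.length_nil]
    omega
  · intro j hj1 hj2
    have hjn : j < p.length + 1 := by
      simp only [List.length_cons, List.length_append, List.length_map, List.length_range',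
        List.length_nil] at hj2
      omega
    have hjs : j < s.length := by omega
    rw [List.getElem_zipWith]
    rcases Nat.eq_zero_or_pos j with h0 | h0
    · subst h0
      simp only [List.getElem_append, List.length_cons, List.length_map, List.length_range',
        List.length_zip, List.length_drop, List.length_nil]
      split_ifs with h1 h2 <;>
        first
        | (exfalso; omega)
        | (simp only [List.getElem_cons_zero]
           rw [List.getD_eq_getElem s 0 (show 0 < s.length by omega),
               List.getD_eq_getElem p 0 (show 0 < p.length by omega)]
           cases p with
           | nil => exact absurd rfl hne
           | cons a t => rfl
           )
    · obtain ⟨j', rfl⟩ : ∃ j', j = j' + 1 := ⟨j - 1, by omega⟩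
      have e1 : (1:ℕ) + j' = j' + 1 := by omega
      rcases Nat.lt_or_ge j' (p.length - 1) with hint | hlast
      · -- interior cell
        simp only [List.getElem_append, List.length_cons, List.length_map, List.length_range',
          List.length_zip, List.length_drop]
        split_ifs with h1 h2 <;>
          first
          | (exfalso; omega)
          | (simp only [List.getElem_cons_succ, List.getElem_map, List.getElem_zip,
               List.getElem_range', List.getElem_drop, one_mul, e1, Nat.add_sub_cancel]
             rw [List.getD_eq_getElem s 0 (show j' + 1 < s.length by omega),
                 List.getD_eq_getElem p 0 (show j' < p.length by omega),
                 List.getD_eq_getElem p 0 (show j' + 1 < p.length by omega)])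
      · -- last cell: j' + 1 = p.length
        have e4 : j' + 1 = p.length := by omega
        simp only [List.getElem_append, List.length_cons, List.length_map, List.length_range',
          List.length_zip, List.length_drop]
        split_ifs with h1 h2 <;>
          first
          | (exfalso; omega)
          | (have e2 : p.length - (min p.length (p.length - 1) + 1) = 0 := by omega
             have e2' : p.length - (p.length - 1 + 1) = 0 := by omega
             have g1 : s.getD p.length 0 = s[p.length]'(by omega) :=
               List.getD_eq_getElem s 0 (by omega)
             have g2 : p.getD (p.length - 1) 0 = p[p.length - 1]'(by omega) :=
               List.getD_eq_getElem p 0 (by omega)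
             simp only [e2, e2', List.getElem_cons_zero, e4, hlastD, g1, g2])

theorem sumLines_eq (p s : List Int) (hpre : Pre_sumLines p s) :
    sumLines p s = sumLines_alt p s := by
  unfold sumLines sumLines_alt
  cases h : p.isEmpty with
  | true =>
    have : p = [] := List.isEmpty_iff.mp h
    subst this; rfl
  | false =>
    have hne : p ≠ [] := by simpa [List.isEmpty_iff] using h
    have hs : p.length + 1 ≤ s.length := by
      rcases hpre with h' | h'
      · exact absurd h' hne
      · exact h'
    have hlen : 1 ≤ p.length := List.length_pos_of_ne_nil hne
    simp only [Bool.false_eq_true, if_false]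
    rw [pv_loopInv p s p.length hlen]
    exact (pv_bridge p s hne hs).symm

-- ===== VERDICT (by name: the statement is the Claim_ definition above) =====
theorem sumLines_spec : Claim_equal_sumLines := by
  intro line_prev line_succ _ hpre
  exact sumLines_eq line_prev line_succ hpre
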